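-- pv_equiv track=rewrite | github.com/web3guru888/ASTRA | astra_core/arc_reasoning/improved_solver.py | detect_geometric_transform
-- ===== SOURCE A (Python) =====
-- from typing import List, Tuple, Dict, Set, Optional, Any, Callable
--
-- def rotate_90(grid):
--     """Rotate grid 90 degrees clockwise."""
--     return [list(row) for row in zip(*grid[::-1])]
--
-- def rotate_180(grid):
--     """Rotate grid 180 degrees."""
--     return [row[::-1] for row in grid[::-1]]
--
-- def rotate_270(grid):
--     """Rotate grid 270 degrees clockwise."""
--     return [list(row)[::-1] for row in zip(*grid)][::-1]
--
-- def reflect_h(grid):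
--     """Reflect horizontally (flip vertical)."""
--     return grid[::-1]
--
-- def reflect_v(grid):
--     """Reflect vertically (flip horizontal)."""
--     return [row[::-1] for row in grid]
--
-- def transpose(grid):
--     """Transpose grid."""
--     return [list(row) for row in zip(*grid)]
--
-- def detect_geometric_transform(train_inputs, train_outputs) -> Optional[str]:
--     """Detect if a simple geometric transformation applies to all pairs."""
--     candidates = []
--
--     # Test each transformation
--     transforms = [
--         ("identity", lambda g: g),
--         ("rotate_90", rotate_90),
--         ("rotate_180", rotate_180),
--         ("rotate_270", rotate_270),
--         ("reflect_h", reflect_h),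
--         ("reflect_v", reflect_v),
--         ("transpose", transpose),
--     ]
--
--     for name, transform in transforms:
--         if all(transform(inp) == out for inp, out in zip(train_inputs, train_outputs)):
--             candidates.append(name)
--
--     return candidates[0] if candidates else None
-- ===== SOURCE B (Python) =====
-- def rotate_90(grid):
--     return [list(row) for row in zip(*grid[::-1])]
--
-- def rotate_180(grid):
--     return [row[::-1] for row in grid[::-1]]
--
-- def rotate_270(grid):
--     return [list(row)[::-1] for row in zip(*grid)][::-1]
--
-- def reflect_h(grid):
--     return grid[::-1]
--
-- def reflect_v(grid):
--     return [row[::-1] for row in grid]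
--
-- def transpose(grid):
--     return [list(row) for row in zip(*grid)]
--
-- _FUNCS = {
--     "identity": lambda g: g,
--     "rotate_90": rotate_90,
--     "rotate_180": rotate_180,
--     "rotate_270": rotate_270,
--     "reflect_h": reflect_h,
--     "reflect_v": reflect_v,
--     "transpose": transpose,
-- }
--
-- def detect_geometric_transform(train_inputs, train_outputs):
--     """Shrink an ordered candidate set over the training pairs."""
--     surviving = list(_FUNCS)
--     for inp, out in zip(train_inputs, train_outputs):
--         surviving = [n for n in surviving if _FUNCS[n](inp) == out]
--         if not surviving:
--             return None
--     return surviving[0] if surviving else None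
-- ===== Notes on version B (the rewrite author's own statement) =====
-- stated objective: alternative
-- what changed: Instead of testing each of the 7 transforms against all pairs and collecting candidates, B iterates over the training pairs once, shrinking an ordered surviving-candidate list and stopping early when it empties.
import Mathlib
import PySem

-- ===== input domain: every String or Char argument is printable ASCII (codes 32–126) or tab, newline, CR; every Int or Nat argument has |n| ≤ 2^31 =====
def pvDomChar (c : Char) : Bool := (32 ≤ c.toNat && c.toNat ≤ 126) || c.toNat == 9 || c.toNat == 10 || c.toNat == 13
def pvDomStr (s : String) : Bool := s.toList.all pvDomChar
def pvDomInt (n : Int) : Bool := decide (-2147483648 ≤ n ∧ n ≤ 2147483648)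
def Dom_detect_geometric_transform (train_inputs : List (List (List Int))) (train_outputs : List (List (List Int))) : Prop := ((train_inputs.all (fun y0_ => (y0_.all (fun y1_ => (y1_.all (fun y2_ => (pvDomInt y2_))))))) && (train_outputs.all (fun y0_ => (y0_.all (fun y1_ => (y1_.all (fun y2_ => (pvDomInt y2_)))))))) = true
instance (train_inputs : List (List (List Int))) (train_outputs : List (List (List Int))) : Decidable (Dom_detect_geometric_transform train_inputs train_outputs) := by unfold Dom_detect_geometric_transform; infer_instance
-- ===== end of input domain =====

-- B differs from A by iterating over the training pairs once with a shrinking ordered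
-- surviving-candidate list (early exit when empty) instead of testing each transform
-- against all pairs; objective: alternative decomposition, same exact results.

-- ===== PORT A =====
-- zip(*grid): columns up to the shortest row (exact for Python's zip of the rows)
def pyZipT (g : List (List Int)) : List (List Int) :=
  match g with
  | [] => []
  | r :: rs =>
    let m := rs.foldl (fun acc row => min acc row.length) r.length
    (List.range m).map (fun j => g.map (fun row => row.getD j 0))

def pyRotate90 (g : List (List Int)) : List (List Int) := pyZipT g.reverse
def pyRotate180 (g : List (List Int)) : List (List Int) := (g.reverse).map List.reverse
def pyRotate270 (g : List (List Int)) : List (List Int) := ((pyZipT g).map List.reverse).reverse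
def pyReflectH (g : List (List Int)) : List (List Int) := g.reverse
def pyReflectV (g : List (List Int)) : List (List Int) := g.map List.reverse
def pyTranspose (g : List (List Int)) : List (List Int) := pyZipT g

def pyTransforms : List (String × (List (List Int) → List (List Int))) :=
  [("identity", fun g => g), ("rotate_90", pyRotate90), ("rotate_180", pyRotate180),
   ("rotate_270", pyRotate270), ("reflect_h", pyReflectH), ("reflect_v", pyReflectV),
   ("transpose", pyTranspose)]

def detect_geometric_transform (train_inputs : List (List (List Int))) (train_outputs : List (List (List Int))) : Option String :=
  let candidates := pyTransforms.foldl
    (fun acc nt =>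
      if (train_inputs.zip train_outputs).all (fun p => nt.2 p.1 == p.2) then acc ++ [nt.1] else acc)
    []
  candidates.head?

-- ===== PORT B =====
def altNames : List String :=
  ["identity", "rotate_90", "rotate_180", "rotate_270", "reflect_h", "reflect_v", "transpose"]

-- the _FUNCS dict lookup of Source B (keys are exactly the seven names)
def altFunc (n : String) (g : List (List Int)) : List (List Int) :=
  if n = "identity" then g
  else if n = "rotate_90" then pyRotate90 g
  else if n = "rotate_180" then pyRotate180 g
  else if n = "rotate_270" then pyRotate270 g
  else if n = "reflect_h" then pyReflectH g
  else if n = "reflect_v" then pyReflectV g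
  else pyTranspose g

def altLoop (pairs : List (List (List Int) × List (List Int))) (surviving : List String) : Option String :=
  match pairs with
  | [] => surviving.head?
  | p :: rest =>
    let surviving' := surviving.filter (fun n => altFunc n p.1 == p.2)
    if surviving'.isEmpty then none else altLoop rest surviving'

def detect_geometric_transform_alt (train_inputs : List (List (List Int))) (train_outputs : List (List (List Int))) : Option String :=
  altLoop (train_inputs.zip train_outputs) altNames

-- ===== PRECONDITION & SPEC =====
def Spec_detect_geometric_transform (train_inputs : List (List (List Int))) (train_outputs : List (List (List Int))) (out : Option String) : Prop := out = detect_geometric_transform_alt train_inputs train_outputs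
instance (train_inputs : List (List (List Int))) (train_outputs : List (List (List Int))) (out : Option String) : Decidable (Spec_detect_geometric_transform train_inputs train_outputs out) := by unfold Spec_detect_geometric_transform; infer_instance

-- ===== CLAIM (what is proved, stated in full; the proofs are below) =====
def Claim_equal_detect_geometric_transform : Prop := ∀ (train_inputs : List (List (List Int))) (train_outputs : List (List (List Int))), Dom_detect_geometric_transform train_inputs train_outputs → Spec_detect_geometric_transform train_inputs train_outputs (detect_geometric_transform train_inputs train_outputs)

-- ===== LEMMAS AND PROOFS =====

theorem altFunc_idy : ∀ g, altFunc "identity" g = g := fun g => by simp [altFunc]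
theorem altFunc_r90 : ∀ g, altFunc "rotate_90" g = pyRotate90 g := fun g => by simp [altFunc]
theorem altFunc_r180 : ∀ g, altFunc "rotate_180" g = pyRotate180 g := fun g => by simp [altFunc]
theorem altFunc_r270 : ∀ g, altFunc "rotate_270" g = pyRotate270 g := fun g => by simp [altFunc]
theorem altFunc_rh : ∀ g, altFunc "reflect_h" g = pyReflectH g := fun g => by simp [altFunc]
theorem altFunc_rv : ∀ g, altFunc "reflect_v" g = pyReflectV g := fun g => by simp [altFunc]
theorem altFunc_tr : ∀ g, altFunc "transpose" g = pyTranspose g := fun g => by simp [altFunc]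

-- the shrinking loop computes the head of the fully filtered candidate list
theorem altLoop_eq_filter (pairs : List (List (List Int) × List (List Int))) (surv : List String) :
    altLoop pairs surv
      = (surv.filter (fun n => pairs.all (fun p => altFunc n p.1 == p.2))).head? := by
  induction pairs generalizing surv with
  | nil => simp [altLoop]
  | cons p rest ih =>
    simp only [altLoop, List.all_cons]
    by_cases h : (surv.filter (fun n => altFunc n p.1 == p.2)).isEmpty
    · rw [if_pos h]
      rw [List.isEmpty_iff, List.filter_eq_nil_iff] at h
      have : surv.filter (fun n => (altFunc n p.1 == p.2) && rest.all (fun q => altFunc n q.1 == q.2)) = [] := by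
        rw [List.filter_eq_nil_iff]
        intro a ha hb
        rw [Bool.and_eq_true] at hb
        exact h a ha hb.1
      rw [this]
      rfl
    · rw [if_neg h, ih, List.filter_filter]
      have hfun : (fun n => (rest.all fun q => altFunc n q.1 == q.2) && (altFunc n p.1 == p.2))
          = (fun n => (altFunc n p.1 == p.2) && rest.all fun q => altFunc n q.1 == q.2) := by
        funext n; exact Bool.and_comm _ _
      rw [hfun]

theorem main_eq (tin tout : List (List (List Int))) :
    detect_geometric_transform tin tout = detect_geometric_transform_alt tin tout := by
  unfold detect_geometric_transform detect_geometric_transform_alt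
  rw [altLoop_eq_filter]
  rw [PySem.List.foldl_append_if (l := pyTransforms)
        (p := fun nt => (tin.zip tout).all (fun q => nt.2 q.1 == q.2)) (f := fun nt => nt.1)]
  have hNames : altNames = pyTransforms.map (fun nt => nt.1) := rfl
  rw [hNames, List.filter_map]
  have hfc : pyTransforms.filter (fun nt => (tin.zip tout).all (fun q => nt.2 q.1 == q.2))
      = pyTransforms.filter ((fun n => (tin.zip tout).all (fun p => altFunc n p.1 == p.2)) ∘ (fun nt => nt.1)) := by
    apply List.filter_congr
    intro x hx
    simp only [pyTransforms, List.mem_cons, List.not_mem_nil, or_false] at hx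
    rcases hx with h|h|h|h|h|h|h <;> subst h <;>
      simp [Function.comp, altFunc_idy, altFunc_r90, altFunc_r180, altFunc_r270,
        altFunc_rh, altFunc_rv, altFunc_tr]
  rw [hfc]
  simp

-- ===== VERDICT (by name: the statement is the Claim_ definition above) =====
theorem detect_geometric_transform_spec : Claim_equal_detect_geometric_transform := by
  intro tin tout _
  exact main_eq tin tout
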